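-- pv_equiv track=rewrite | github.com/epoyraz/leetcode | solutions/1968.py | maxBuilding
-- ===== SOURCE A (Python) =====
-- def maxBuilding(n, restrictions):
--     # add building 1 and n
--     restrictions.append([1, 0])
--     restrictions.append([n, n-1])
--     # sort by position
--     restrictions.sort(key=lambda x: x[0])
--     m = len(restrictions)
--     # forward pass
--     for i in range(1, m):
--         dist = restrictions[i][0] - restrictions[i-1][0]
--         restrictions[i][1] = min(restrictions[i][1],
--                                  restrictions[i-1][1] + dist)
--     # backward pass
--     for i in range(m-2, -1, -1):
--         dist = restrictions[i+1][0] - restrictions[i][0]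
--         restrictions[i][1] = min(restrictions[i][1],
--                                  restrictions[i+1][1] + dist)
--     # compute maximum between adjacent restrictions
--     ans = 0
--     for i in range(1, m):
--         id1, h1 = restrictions[i-1]
--         id2, h2 = restrictions[i]
--         d = id2 - id1
--         # max height in this segment
--         local_max = (h1 + h2 + d) // 2
--         if local_max > ans:
--             ans = local_max
--     return ans
-- ===== SOURCE B (Python) =====
-- def maxBuilding(n, restrictions):
--     # add building 1 and n
--     restrictions.append([1, 0])
--     restrictions.append([n, n - 1])
--     # sort by position (same in-place prelude as A)
--     restrictions.sort(key=lambda x: x[0])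
--     # constrained height of each restriction: all-pairs min instead of two relaxation passes
--     heights = [min(h + abs(x - xj) for xj, h in restrictions)
--                for x, _ in restrictions]
--     for r, h in zip(restrictions, heights):
--         r[1] = h
--     # maximum between adjacent restrictions
--     ans = 0
--     for (x1, h1), (x2, h2) in zip(restrictions, restrictions[1:]):
--         local = (h1 + h2 + (x2 - x1)) // 2
--         if local > ans:
--             ans = local
--     return ans
-- ===== Notes on version B (the rewrite author's own statement) =====
-- stated objective: alternative
-- what changed: The forward+backward relaxation passes over the sorted restrictions are replaced by a direct all-pairs computation: each restriction's constrained height is min over all restrictions j of h_j + |x_i - x_j|; the final adjacent-segment scan is a single fold over zipped neighbours.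
import Mathlib
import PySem

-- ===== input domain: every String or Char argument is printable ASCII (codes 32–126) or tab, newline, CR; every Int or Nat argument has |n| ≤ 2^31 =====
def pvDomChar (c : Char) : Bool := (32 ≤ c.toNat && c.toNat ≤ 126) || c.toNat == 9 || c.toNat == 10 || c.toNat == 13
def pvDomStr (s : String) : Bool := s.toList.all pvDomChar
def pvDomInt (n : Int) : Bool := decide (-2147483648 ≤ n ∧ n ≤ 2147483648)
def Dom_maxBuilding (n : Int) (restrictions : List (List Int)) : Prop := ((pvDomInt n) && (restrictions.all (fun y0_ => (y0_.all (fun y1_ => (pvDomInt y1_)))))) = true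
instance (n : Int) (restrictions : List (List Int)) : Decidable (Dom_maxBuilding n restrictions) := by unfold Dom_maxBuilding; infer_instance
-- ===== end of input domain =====

-- B replaces A's forward+backward relaxation passes by the direct all-pairs formula
-- min_j (h_j + |x_i - x_j|); same in-place mutation of the argument as A (the theorems
-- here are about the return value).

-- r[0] and r[1]; exact under Pre_ (every restriction is a 2-element list)
def pvGetP (r : List Int) : Int := PySem.List.pyGetD r 0 0
def pvGetH (r : List Int) : Int := PySem.List.pyGetD r 1 0

-- ===== PORT A =====
-- forward pass: restrictions[i][1] = min(r[i][1], r[i-1][1] + dist), carrying the updated previous row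
def pvFwd (prev : List Int) : List (List Int) → List (List Int)
  | [] => []
  | r :: t =>
      let dist := pvGetP r - pvGetP prev
      let r' := [pvGetP r, min (pvGetH r) (pvGetH prev + dist)]
      r' :: pvFwd r' t

def pvForward : List (List Int) → List (List Int)
  | [] => []
  | r :: t => r :: pvFwd r t

-- backward pass: i from m-2 down to 0, reading the already-updated row i+1
def pvBackward : List (List Int) → List (List Int)
  | [] => []
  | [r] => [r]
  | r :: s :: t =>
      let t' := pvBackward (s :: t)
      let nxt := t'.headD []
      let dist := pvGetP nxt - pvGetP r
      [pvGetP r, min (pvGetH r) (pvGetH nxt + dist)] :: t'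

-- final loop of A: max over adjacent pairs of (h1+h2+d)//2
def pvScan (ans : Int) : List (List Int) → Int
  | [] => ans
  | [_] => ans
  | r1 :: r2 :: t =>
      let d := pvGetP r2 - pvGetP r1
      let localMax := PySem.Int.floordiv (pvGetH r1 + pvGetH r2 + d) 2
      pvScan (if localMax > ans then localMax else ans) (r2 :: t)

def maxBuilding (n : Int) (restrictions : List (List Int)) : Int :=
  let rs0 := restrictions ++ [[1, 0], [n, n - 1]]
  let rs := PySem.List.sorted rs0 (fun r => pvGetP r) false
  pvScan 0 (pvBackward (pvForward rs))

-- ===== PORT B =====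
-- min(h + abs(x - xj) for xj, h in restrictions)  (Python min over a nonempty sequence)
def pvAllMin (l : List (List Int)) (x : Int) : Int :=
  match l.map (fun s => pvGetH s + |x - pvGetP s|) with
  | [] => 0
  | c :: cs => cs.foldl min c

def maxBuilding_alt (n : Int) (restrictions : List (List Int)) : Int :=
  let rs := PySem.List.sorted (restrictions ++ [[1, 0], [n, n - 1]]) (fun r => pvGetP r) false
  let heights := rs.map (fun r => pvAllMin rs (pvGetP r))
  let rs2 := (rs.zip heights).map (fun p => [pvGetP p.1, p.2])
  (rs2.zip rs2.tail).foldl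
    (fun ans p =>
      let localMax := PySem.Int.floordiv (pvGetH p.1 + pvGetH p.2 + (pvGetP p.2 - pvGetP p.1)) 2
      if localMax > ans then localMax else ans) 0

-- ===== PRECONDITION & SPEC =====
-- Pre_ excludes exactly the inputs on which the Python A raises: any restriction that is
-- not a 2-element [pos, height] list (IndexError in the passes / ValueError in the unpack).
def Pre_maxBuilding (n : Int) (restrictions : List (List Int)) : Prop :=
  ∀ r ∈ restrictions, r.length = 2
instance (n : Int) (restrictions : List (List Int)) : Decidable (Pre_maxBuilding n restrictions) := by
  unfold Pre_maxBuilding; infer_instance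

def pvWitness_maxBuilding : Int × List (List Int) := (4, [[2, 1]])

def Spec_maxBuilding (n : Int) (restrictions : List (List Int)) (out : Int) : Prop := out = maxBuilding_alt n restrictions
instance (n : Int) (restrictions : List (List Int)) (out : Int) : Decidable (Spec_maxBuilding n restrictions out) := by unfold Spec_maxBuilding; infer_instance

-- ===== CLAIM (what is proved, stated in full; the proofs are below) =====
def Claim_equal_maxBuilding : Prop := ∀ (n : Int) (restrictions : List (List Int)), Dom_maxBuilding n restrictions → Pre_maxBuilding n restrictions → Spec_maxBuilding n restrictions (maxBuilding n restrictions)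

-- ===== LEMMAS AND PROOFS =====

theorem pvGetP_pair (x h : Int) : pvGetP [x, h] = x := by
  simp [pvGetP, PySem.List.pyGetD]

theorem pvGetH_pair (x h : Int) : pvGetH [x, h] = h := by
  simp [pvGetH, PySem.List.pyGetD]

-- accumulator form of the forward pass
def pvF (c : Int) : List (List Int) → List (List Int)
  | [] => []
  | r :: t => [pvGetP r, min (pvGetH r) (c + pvGetP r)] :: pvF (min (pvGetH r - pvGetP r) c) t

theorem pvFwd_eq_F (t : List (List Int)) : ∀ prev,
    pvFwd prev t = pvF (pvGetH prev - pvGetP prev) t := by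
  induction t with
  | nil => intro prev; rfl
  | cons r t ih =>
      intro prev
      have harg : pvGetH prev + (pvGetP r - pvGetP prev)
          = (pvGetH prev - pvGetP prev) + pvGetP r := by ring
      have hacc : min (pvGetH r) ((pvGetH prev - pvGetP prev) + pvGetP r) - pvGetP r
          = min (pvGetH r - pvGetP r) (pvGetH prev - pvGetP prev) := by omega
      simp only [pvFwd, pvF, harg, ih, pvGetH_pair, pvGetP_pair, hacc]

theorem foldl_min_cons (l : List Int) : ∀ a b : Int,
    List.foldl min (min a b) l = min a (List.foldl min b l) := by
  induction l with
  | nil => intro a b; rfl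
  | cons c l ih =>
      intro a b
      simp only [List.foldl]
      rw [min_assoc, ih]

theorem pvAllMin_cons (a b : List Int) (l : List (List Int)) (x : Int) :
    pvAllMin (a :: b :: l) x
      = min (pvGetH a + |x - pvGetP a|) (pvAllMin (b :: l) x) := by
  simp only [pvAllMin, List.map, List.foldl]
  rw [foldl_min_cons]

theorem pvAllMin_single (a : List Int) (x : Int) :
    pvAllMin [a] x = pvGetH a + |x - pvGetP a| := rfl

-- moving the query point left of every position shifts the min linearly
theorem pvAllMin_shift (l : List (List Int)) : ∀ (y : List Int) (x x2 : Int),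
    x ≤ x2 → (∀ z ∈ y :: l, x2 ≤ pvGetP z) →
    pvAllMin (y :: l) x = pvAllMin (y :: l) x2 + (x2 - x) := by
  induction l with
  | nil =>
      intro y x x2 hx hall
      have hy := hall y (by simp)
      rw [pvAllMin_single, pvAllMin_single]
      rw [abs_of_nonpos (by omega), abs_of_nonpos (by omega)]
      omega
  | cons z l ih =>
      intro y x x2 hx hall
      have hy := hall y (by simp)
      rw [pvAllMin_cons, pvAllMin_cons]
      rw [ih z x x2 hx (fun w hw => hall w (List.mem_cons_of_mem _ hw))]
      rw [abs_of_nonpos (by omega), abs_of_nonpos (by omega)]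
      omega

-- the backward pass applied to the accumulator-form forward result: all-pairs minima
theorem pvBackward_F (t : List (List Int)) : ∀ c : Int,
    t.Pairwise (fun a b => pvGetP a ≤ pvGetP b) →
    pvBackward (pvF c t)
      = t.map (fun r => [pvGetP r, min (c + pvGetP r) (pvAllMin t (pvGetP r))]) := by
  induction t with
  | nil => intro c _; rfl
  | cons r t ih =>
      intro c hp
      match t with
      | [] =>
          simp [pvF, pvBackward, pvAllMin_single]
          omega
      | s :: t =>
          have hps : pvGetP r ≤ pvGetP s := (List.pairwise_cons.mp hp).1 s (by simp)
          have htail : (s :: t).Pairwise (fun a b => pvGetP a ≤ pvGetP b) :=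
            (List.pairwise_cons.mp hp).2
          have hge : ∀ z ∈ s :: t, pvGetP s ≤ pvGetP z := by
            intro z hz
            rcases List.mem_cons.mp hz with h | h
            · subst h; exact le_refl _
            · exact (List.pairwise_cons.mp htail).1 z h
          have hshift := pvAllMin_shift t s (pvGetP r) (pvGetP s) hps hge
          have hF : pvF (min (pvGetH r - pvGetP r) c) (s :: t)
              = [pvGetP s, min (pvGetH s) (min (pvGetH r - pvGetP r) c + pvGetP s)]
                  :: pvF (min (pvGetH s - pvGetP s) (min (pvGetH r - pvGetP r) c)) t := rfl
          rw [show pvF c (r :: s :: t)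
                = [pvGetP r, min (pvGetH r) (c + pvGetP r)]
                    :: pvF (min (pvGetH r - pvGetP r) c) (s :: t) from rfl, hF]
          simp only [pvBackward]
          rw [← hF, ih (min (pvGetH r - pvGetP r) c) htail]
          simp only [List.map_cons, List.headD_cons, List.cons_eq_cons,
            pvGetP_pair, pvGetH_pair]
          refine ⟨?_, ?_, ?_⟩
          · rw [pvAllMin_cons, sub_self, abs_zero, add_zero, hshift]
            simp only [List.cons.injEq, and_true, true_and]
            omega
          · rw [pvAllMin_cons, abs_of_nonneg (by omega : (0:Int) ≤ pvGetP s - pvGetP r)]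
            simp only [List.cons.injEq, and_true, true_and]
            omega
          · apply List.map_congr_left
            intro z hz
            have hz' : pvGetP r ≤ pvGetP z :=
              (List.pairwise_cons.mp hp).1 z (List.mem_cons_of_mem _ hz)
            rw [pvAllMin_cons, abs_of_nonneg (by omega)]
            simp only [List.cons.injEq, and_true, true_and]
            omega

-- heights after forward+backward on a sorted list = all-pairs minima (length ≥ 2)
theorem pvBackward_forward (r s : List Int) (t : List (List Int))
    (hp : (r :: s :: t).Pairwise (fun a b => pvGetP a ≤ pvGetP b)) :
    pvBackward (pvForward (r :: s :: t))
      = (r :: s :: t).map (fun y => [pvGetP y, pvAllMin (r :: s :: t) (pvGetP y)]) := by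
  have hps : pvGetP r ≤ pvGetP s := (List.pairwise_cons.mp hp).1 s (by simp)
  have htail : (s :: t).Pairwise (fun a b => pvGetP a ≤ pvGetP b) :=
    (List.pairwise_cons.mp hp).2
  have hge : ∀ z ∈ s :: t, pvGetP s ≤ pvGetP z := by
    intro z hz
    rcases List.mem_cons.mp hz with h | h
    · subst h; exact le_refl _
    · exact (List.pairwise_cons.mp htail).1 z h
  have hshift := pvAllMin_shift t s (pvGetP r) (pvGetP s) hps hge
  simp only [pvForward]
  rw [pvFwd_eq_F]
  have hF : pvF (pvGetH r - pvGetP r) (s :: t)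
      = [pvGetP s, min (pvGetH s) ((pvGetH r - pvGetP r) + pvGetP s)]
          :: pvF (min (pvGetH s - pvGetP s) (pvGetH r - pvGetP r)) t := rfl
  rw [hF]
  simp only [pvBackward]
  rw [← hF, pvBackward_F (s :: t) (pvGetH r - pvGetP r) htail]
  simp only [List.map_cons, List.headD_cons, List.cons_eq_cons,
    pvGetP_pair, pvGetH_pair]
  refine ⟨?_, ?_, ?_⟩
  · rw [pvAllMin_cons, sub_self, abs_zero, add_zero, hshift]
    simp only [List.cons.injEq, and_true, true_and]
    omega
  · rw [pvAllMin_cons, abs_of_nonneg (by omega : (0:Int) ≤ pvGetP s - pvGetP r)]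
    simp only [List.cons.injEq, and_true, true_and]
    omega
  · apply List.map_congr_left
    intro z hz
    have hz' : pvGetP r ≤ pvGetP z :=
      (List.pairwise_cons.mp hp).1 z (List.mem_cons_of_mem _ hz)
    rw [pvAllMin_cons, abs_of_nonneg (by omega)]
    simp only [List.cons.injEq, and_true, true_and]
    omega

-- B's zip-write-back builds exactly the mapped list
theorem pvZipMap (rs : List (List Int)) (f : List Int → Int) :
    (rs.zip (rs.map f)).map (fun p => [pvGetP p.1, p.2])
      = rs.map (fun r => [pvGetP r, f r]) := by
  induction rs with
  | nil => rfl
  | cons r rs ih => simp only [List.map, List.zip_cons_cons, ih]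

-- B's fold over zipped neighbours computes A's adjacent scan
theorem pvFold_eq_scan (l : List (List Int)) : ∀ ans : Int,
    (l.zip l.tail).foldl
      (fun ans p =>
        let localMax := PySem.Int.floordiv (pvGetH p.1 + pvGetH p.2 + (pvGetP p.2 - pvGetP p.1)) 2
        if localMax > ans then localMax else ans) ans
    = pvScan ans l := by
  induction l with
  | nil => intro ans; rfl
  | cons r l ih =>
      intro ans
      match l with
      | [] => rfl
      | s :: t =>
          simp only [List.tail_cons, List.zip_cons_cons, List.foldl]
          rw [show (s :: t).zip t = (s :: t).zip (s :: t).tail from rfl, ih]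
          rfl

-- ===== VERDICT (by name: the statement is the Claim_ definition above) =====
theorem maxBuilding_spec : Claim_equal_maxBuilding := by
  intro n restrictions _ _
  unfold Spec_maxBuilding maxBuilding maxBuilding_alt
  simp only []
  rw [pvZipMap, pvFold_eq_scan]
  congr 1
  have hlen : 2 ≤ (PySem.List.sorted (restrictions ++ [[1, 0], [n, n - 1]]) (fun r => pvGetP r) false).length := by
    rw [PySem.List.length_sorted]
    simp
  have hp := PySem.List.sorted_pairwise (restrictions ++ [[1, 0], [n, n - 1]]) (fun r => pvGetP r)
  match hm : PySem.List.sorted (restrictions ++ [[1, 0], [n, n - 1]]) (fun r => pvGetP r) false with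
  | [] => rw [hm] at hlen; simp at hlen
  | [r] => rw [hm] at hlen; simp at hlen
  | r :: s :: t =>
      rw [hm] at hp
      exact pvBackward_forward r s t hp
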